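-- pv_equiv track=rewrite | github.com/mool32/oscillatory-nfl-cancer | step10_rds_computation.py | check_irreplaceability
-- ===== SOURCE A (Python) =====
-- def check_irreplaceability(gene, loop_genes, adj, edges):
--     """
--     Check if gene G is irreplaceable in a feedback loop.
--
--     G is irreplaceable if removing it from the network destroys
--     the negative feedback path among remaining loop members.
--
--     For a loop [A, B, C] where we remove B:
--     Check if there's still a path A → ... → C with the same
--     net inhibitory effect, using only edges NOT through B.
--     """
--     loop_list = list(loop_genes)
--     if gene not in loop_list:
--         return True  # shouldn't happen
--
--     # For simplicity with 2-3 node loops: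
--     if len(loop_list) == 2:
--         # Two-node loop: A ↔ B. Removing either breaks the loop entirely.
--         return True
--
--     if len(loop_list) == 3:
--         # Three-node loop: A → B → C ⊣ A (or variants).
--         # Removing B: need A → ? → C without B. Check 1-hop alternatives.
--         remaining = [g for g in loop_list if g != gene]
--         g1, g2 = remaining
--
--         # Check if there's any path from g1 to g2 (or g2 to g1)
--         # that doesn't go through gene, with at most 2 hops
--         for mid_gene, sign in adj.get(g1, []):
--             if mid_gene == gene:
--                 continue
--             for tgt, sign2 in adj.get(mid_gene, []):
--                 if tgt == g2:
--                     # Alternative path exists: g1 → mid → g2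
--                     # Check if net sign preserves negative feedback
--                     return False  # There's an alternative — gene is replaceable
--
--         for mid_gene, sign in adj.get(g2, []):
--             if mid_gene == gene:
--                 continue
--             for tgt, sign2 in adj.get(mid_gene, []):
--                 if tgt == g1:
--                     return False
--
--         return True  # No alternative found — gene is irreplaceable
--
--     # For longer loops, conservative: assume irreplaceable
--     return True
-- ===== SOURCE B (Python) =====
-- def check_irreplaceability(gene, loop_genes, adj, edges):
--     loop_list = list(loop_genes)
--     if gene not in loop_list or len(loop_list) != 3:
--         return True
--     g1, g2 = [g for g in loop_list if g != gene]
--     # Compose the whole gene-avoiding 2-hop relation of the graph once,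
--     # then answer both directed queries by membership.
--     two_hop = {(u, t)
--                for u, nbrs in adj.items()
--                for m, _ in nbrs if m != gene
--                for t, _ in adj.get(m, [])}
--     return (g1, g2) not in two_hop and (g2, g1) not in two_hop
-- ===== Notes on version B (the rewrite author's own statement) =====
-- stated objective: alternative
-- what changed: Instead of A's four nested early-return scans rooted at g1 and g2, B composes the entire gene-avoiding 2-hop relation of the graph into one set of (source,target) pairs and answers both directed queries by membership; the guard branches are merged into one.
import Mathlib
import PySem

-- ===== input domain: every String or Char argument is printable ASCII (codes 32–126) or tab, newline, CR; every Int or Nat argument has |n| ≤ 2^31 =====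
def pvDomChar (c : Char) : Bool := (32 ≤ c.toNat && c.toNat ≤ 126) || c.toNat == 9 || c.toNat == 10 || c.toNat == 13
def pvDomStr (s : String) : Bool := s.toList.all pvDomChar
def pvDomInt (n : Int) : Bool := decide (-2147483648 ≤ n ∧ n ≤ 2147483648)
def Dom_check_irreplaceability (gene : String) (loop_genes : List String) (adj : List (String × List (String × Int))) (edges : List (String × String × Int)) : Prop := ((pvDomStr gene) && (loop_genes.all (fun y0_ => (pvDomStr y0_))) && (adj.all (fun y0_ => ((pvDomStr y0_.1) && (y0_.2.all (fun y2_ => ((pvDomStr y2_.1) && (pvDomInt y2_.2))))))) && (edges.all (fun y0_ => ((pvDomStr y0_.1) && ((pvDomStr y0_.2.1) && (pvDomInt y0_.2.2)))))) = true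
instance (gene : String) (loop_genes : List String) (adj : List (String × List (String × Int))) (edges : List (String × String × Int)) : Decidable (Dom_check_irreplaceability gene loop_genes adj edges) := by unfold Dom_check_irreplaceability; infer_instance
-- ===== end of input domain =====

-- B replaces A's four nested early-return scans rooted at g1/g2 by composing the whole
-- gene-avoiding 2-hop relation of the graph into one set and testing two memberships;
-- objective: alternative (same small-degree cost, different algorithm).

-- ===== PORT A =====
-- adj.get(k, [])  (first-match association-list lookup; adj is a Python dict)
def ckGet (adj : List (String × List (String × Int))) (k : String) : List (String × Int) :=
  PySem.Dict.getD (PySem.Dict.mk adj) k []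

-- inner loop: 'for tgt, sign2 in adj.get(mid_gene, []): if tgt == g2: return False'
def ckInner (g2 : String) : List (String × Int) → Bool
  | [] => false
  | (tgt, _) :: rest => if tgt == g2 then true else ckInner g2 rest

-- outer loop: 'for mid_gene, sign in adj.get(g, []): …'
def ckOuter (gene g2 : String) (adj : List (String × List (String × Int))) : List (String × Int) → Bool
  | [] => false
  | (mid, _) :: rest =>
    if mid == gene then ckOuter gene g2 adj rest
    else if ckInner g2 (ckGet adj mid) then true
    else ckOuter gene g2 adj rest

def check_irreplaceability (gene : String) (loop_genes : List String) (adj : List (String × List (String × Int))) (edges : List (String × String × Int)) : Bool :=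
  let loop_list := loop_genes
  if !loop_list.contains gene then true
  else if loop_list.length == 2 then true
  else if loop_list.length == 3 then
    let remaining := loop_list.filter (fun g => g != gene)
    match remaining with
    | [g1, g2] =>
      if ckOuter gene g2 adj (ckGet adj g1) then false
      else if ckOuter gene g1 adj (ckGet adj g2) then false
      else true
    | _ => true  -- Python raises here (unpacking); excluded by Pre_
  else true

-- ===== PORT B =====
-- adj.get(k, []) as B's own helper (B also calls adj.get)
def ckGetB (adj : List (String × List (String × Int))) (k : String) : List (String × Int) :=
  PySem.Dict.getD (PySem.Dict.mk adj) k []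

-- {(u, t) for u, nbrs in adj.items() for m, _ in nbrs if m != gene for t, _ in adj.get(m, [])}
def ckTwoHopSet (gene : String) (adj : List (String × List (String × Int))) : PySem.Set (String × String) :=
  PySem.Set.ofList
    (adj.flatMap (fun e =>
      (e.2.filter (fun p => p.1 != gene)).flatMap (fun p =>
        (ckGetB adj p.1).map (fun q => (e.1, q.1)))))

def check_irreplaceability_alt (gene : String) (loop_genes : List String) (adj : List (String × List (String × Int))) (edges : List (String × String × Int)) : Bool :=
  if !loop_genes.contains gene || loop_genes.length != 3 then true
  else
    let remaining := loop_genes.filter (fun g => g != gene)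
    if remaining.length == 2 then  -- 'g1, g2 = remaining'; Python raises otherwise (excluded by Pre_)
      let g1 := remaining.getD 0 ""
      let g2 := remaining.getD 1 ""
      let two_hop := ckTwoHopSet gene adj
      !(PySem.Set.contains two_hop (g1, g2)) && !(PySem.Set.contains two_hop (g2, g1))
    else true

-- ===== PRECONDITION & SPEC =====
-- Pre_ excludes (a) adj association lists with duplicate keys — no Python dict argument has
-- them, and A's first-match reading of such a list is accidental — and (b) loop_genes on which
-- Python A RAISES ValueError: gene ∈ loop_genes of length 3 whose non-gene part has ≠ 2
-- elements ('g1, g2 = remaining' fails to unpack).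
def Pre_check_irreplaceability (gene : String) (loop_genes : List String) (adj : List (String × List (String × Int))) (edges : List (String × String × Int)) : Prop :=
  (adj.map Prod.fst).Nodup ∧
  (gene ∈ loop_genes → loop_genes.length = 3 → (loop_genes.filter (fun g => g != gene)).length = 2)
instance (gene : String) (loop_genes : List String) (adj : List (String × List (String × Int))) (edges : List (String × String × Int)) : Decidable (Pre_check_irreplaceability gene loop_genes adj edges) := by unfold Pre_check_irreplaceability; infer_instance

def pvWitness_check_irreplaceability : String × List String × (List (String × List (String × Int))) × (List (String × String × Int)) :=
  ("x", ["x", "a", "b"], [("a", [("m", 1)]), ("m", [("b", 1)])], [])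

def Spec_check_irreplaceability (gene : String) (loop_genes : List String) (adj : List (String × List (String × Int))) (edges : List (String × String × Int)) (out : Bool) : Prop := out = check_irreplaceability_alt gene loop_genes adj edges
instance (gene : String) (loop_genes : List String) (adj : List (String × List (String × Int))) (edges : List (String × String × Int)) (out : Bool) : Decidable (Spec_check_irreplaceability gene loop_genes adj edges out) := by unfold Spec_check_irreplaceability; infer_instance

-- ===== CLAIM =====
def Claim_equal_check_irreplaceability : Prop := ∀ (gene : String) (loop_genes : List String) (adj : List (String × List (String × Int))) (edges : List (String × String × Int)), Dom_check_irreplaceability gene loop_genes adj edges → Pre_check_irreplaceability gene loop_genes adj edges → Spec_check_irreplaceability gene loop_genes adj edges (check_irreplaceability gene loop_genes adj edges)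

-- ===== LEMMAS AND PROOFS =====

-- A's inner scan is an existence test over the adjacency targets
lemma ckInner_eq_any (g2 : String) (l : List (String × Int)) :
    ckInner g2 l = l.any (fun p => p.1 == g2) := by
  induction l with
  | nil => rfl
  | cons p rest ih => cases p with | mk t s => simp [ckInner, ih]; tauto

-- A's outer scan is an existence test: some mid ≠ gene whose targets contain g2
lemma ckOuter_eq_any (gene g2 : String) (adj : List (String × List (String × Int))) (l : List (String × Int)) :
    ckOuter gene g2 adj l
      = l.any (fun p => p.1 != gene && (ckGet adj p.1).any (fun q => q.1 == g2)) := by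
  induction l with
  | nil => rfl
  | cons p rest ih =>
    obtain ⟨m, s⟩ := p
    simp only [ckOuter, List.any_cons, ih, ckInner_eq_any]
    by_cases hm : m = gene
    · simp [hm]
    · by_cases h : ((ckGet adj m).any fun q => q.1 == g2) = true <;> simp [hm, h]

-- the two lookup helpers are the same function
lemma ckGetB_eq (adj : List (String × List (String × Int))) (k : String) :
    ckGetB adj k = ckGet adj k := rfl

-- with unique keys, a row of adj IS the lookup result
lemma ckGet_of_mem {adj : List (String × List (String × Int))} {k : String} {v : List (String × Int)}
    (hnd : (adj.map Prod.fst).Nodup) (hm : (k, v) ∈ adj) : ckGet adj k = v := by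
  have : (PySem.Dict.mk adj).get? k = some v :=
    PySem.Dict.get?_of_mem_items (d := PySem.Dict.mk adj) hm hnd
  simp [ckGet, PySem.Dict.getD_eq_get?_getD, this]

-- a nonempty lookup result is a row of adj
lemma mem_of_ckGet_ne_nil {adj : List (String × List (String × Int))} {k : String}
    (h : ckGet adj k ≠ []) : (k, ckGet adj k) ∈ adj := by
  unfold ckGet at h ⊢
  rw [PySem.Dict.getD_eq_get?_getD] at h ⊢
  cases hg : (PySem.Dict.mk adj).get? k with
  | none => rw [hg] at h; simp at h
  | some v =>
    simpa using PySem.Dict.mem_items_of_get?_eq_some (d := PySem.Dict.mk adj) hg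

-- B's composed relation holds (s, d) iff A's scan from s succeeds (unique keys)
lemma twoHop_mem (gene s d : String) (adj : List (String × List (String × Int)))
    (hnd : (adj.map Prod.fst).Nodup) :
    ((s, d) ∈ ckTwoHopSet gene adj) ↔ ckOuter gene d adj (ckGet adj s) = true := by
  rw [ckOuter_eq_any]
  simp only [ckTwoHopSet, ckGetB_eq, PySem.Set.mem_ofList, List.mem_flatMap,
    List.mem_map, List.mem_filter, List.any_eq_true, Bool.and_eq_true, bne_iff_ne, beq_iff_eq]
  constructor
  · rintro ⟨⟨u, nbrs⟩, hrow, ⟨m, sg⟩, ⟨hmn, hne⟩, ⟨t, sg2⟩, ht, heq⟩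
    simp only [Prod.mk.injEq] at heq
    obtain ⟨rfl, rfl⟩ := heq
    rw [ckGet_of_mem hnd hrow]
    exact ⟨(m, sg), hmn, hne, ⟨(t, sg2), ht, rfl⟩⟩
  · rintro ⟨⟨m, sg⟩, hmn, hne, ⟨t, sg2⟩, ht, rfl⟩
    have hrow : (s, ckGet adj s) ∈ adj := by
      apply mem_of_ckGet_ne_nil
      intro hnil; rw [hnil] at hmn; exact (List.not_mem_nil) hmn
    exact ⟨(s, ckGet adj s), hrow, ⟨m, sg⟩, ⟨hmn, hne⟩, ⟨t, sg2⟩, ht, rfl⟩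

-- ===== VERDICT =====
theorem check_irreplaceability_spec : Claim_equal_check_irreplaceability := by
  intro gene loop_genes adj edges _ hpre
  obtain ⟨hnd, hlen⟩ := hpre
  unfold Spec_check_irreplaceability check_irreplaceability check_irreplaceability_alt
  by_cases hin : gene ∈ loop_genes
  · by_cases h3 : loop_genes.length = 3
    · have h2 := hlen hin h3
      cases hrem : loop_genes.filter (fun g => g != gene) with
      | nil => rw [hrem] at h2; simp at h2
      | cons g1 t =>
        cases t with
        | nil => rw [hrem] at h2; simp at h2
        | cons g2 t2 =>
          cases t2 with
          | nil =>
            by_cases ha : ckOuter gene g2 adj (ckGet adj g1) = true <;>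
              by_cases hb : ckOuter gene g1 adj (ckGet adj g2) = true <;>
              simp [hin, h3, hrem, ha, hb,
                twoHop_mem gene g1 g2 adj hnd, twoHop_mem gene g2 g1 adj hnd]
          | cons x t3 => rw [hrem] at h2; simp at h2
    · by_cases h2 : loop_genes.length = 2 <;> simp [hin, h2, h3]
  · simp [hin]
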